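-- pv_equiv track=rewrite | github.com/cvanmeter-rl/MyPrograms | SchoolStuff/PythonProjects/SudokuSolver/sudoku.py | minRemVal
-- ===== SOURCE A (Python) =====
-- def minRemVal(emptyCells,domains):
--     minCells = []
--     minValues = float('inf')
--
--     for cell in emptyCells:
--         val = domains[cell]
--         if len(val) == minValues:
--             minCells.append(cell)
--         elif len(val) < minValues:
--             minCells.clear()
--             minCells.append(cell)
--             minValues = len(val)
--     return minCells
-- ===== SOURCE B (Python) =====
-- def minRemVal(emptyCells, domains):
--     if not emptyCells:
--         return []
--     m = min(len(domains[c]) for c in emptyCells)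
--     return [c for c in emptyCells if len(domains[c]) == m]
-- ===== Notes on version B (the rewrite author's own statement) =====
-- stated objective: simpler
-- what changed: B replaces A's one-pass running-minimum loop with clear/append bookkeeping by a guard plus two plain passes: compute the minimum domain size with min(), then filter the cells attaining it.
import Mathlib
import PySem

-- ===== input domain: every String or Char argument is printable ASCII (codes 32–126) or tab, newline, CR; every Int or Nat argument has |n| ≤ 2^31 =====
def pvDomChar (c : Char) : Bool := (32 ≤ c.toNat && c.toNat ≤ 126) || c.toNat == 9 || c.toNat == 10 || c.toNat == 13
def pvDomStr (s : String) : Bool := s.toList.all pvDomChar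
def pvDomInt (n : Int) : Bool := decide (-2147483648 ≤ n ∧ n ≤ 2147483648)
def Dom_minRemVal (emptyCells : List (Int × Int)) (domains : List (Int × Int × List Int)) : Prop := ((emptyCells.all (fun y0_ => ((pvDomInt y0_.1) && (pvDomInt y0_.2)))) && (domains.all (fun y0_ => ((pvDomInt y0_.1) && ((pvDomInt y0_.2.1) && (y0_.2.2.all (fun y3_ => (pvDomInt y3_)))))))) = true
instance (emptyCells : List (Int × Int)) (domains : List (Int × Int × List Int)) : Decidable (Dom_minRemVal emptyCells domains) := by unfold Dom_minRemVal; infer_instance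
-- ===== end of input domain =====

-- B replaces A's one-pass running-minimum loop (clear/append bookkeeping) by two plain passes:
-- compute the minimum domain length, then filter the cells attaining it (simpler decomposition, same cost).
-- Pre_ excludes inputs on which A raises KeyError (a cell of emptyCells missing from domains).

-- ===== PORT A =====
-- dict lookup domains[cell] (first matching key); none = KeyError
def pvLookup (domains : List (Int × Int × List Int)) (cell : Int × Int) : Option (List Int) :=
  match domains with
  | [] => none
  | (r, c, v) :: rest => if (r, c) = cell then some v else pvLookup rest cell

-- len(domains[cell]); inside Pre_ the lookup always succeeds, so the default is never used
def pvLen (domains : List (Int × Int × List Int)) (cell : Int × Int) : Nat :=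
  ((pvLookup domains cell).getD []).length

-- loop body of A; state = (minCells, minValues) with none = float('inf')
def minRemValStep (domains : List (Int × Int × List Int))
    (s : List (Int × Int) × Option Nat) (cell : Int × Int) : List (Int × Int) × Option Nat :=
  let vlen := pvLen domains cell
  match s.2 with
  | some m =>
      if vlen = m then (s.1 ++ [cell], some m)
      else if vlen < m then ([cell], some vlen)
      else s
  | none => ([cell], some vlen)

def minRemVal (emptyCells : List (Int × Int)) (domains : List (Int × Int × List Int)) : List (Int × Int) :=
  (emptyCells.foldl (minRemValStep domains) ([], none)).1

-- ===== PORT B =====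
def minRemVal_alt (emptyCells : List (Int × Int)) (domains : List (Int × Int × List Int)) : List (Int × Int) :=
  match (emptyCells.map (pvLen domains)).min? with
  | none => []
  | some m => emptyCells.filter (fun c => pvLen domains c == m)

-- ===== PRECONDITION & SPEC =====
-- Pre_ excludes exactly the inputs where A raises KeyError: a cell of emptyCells with no entry in domains.
def Pre_minRemVal (emptyCells : List (Int × Int)) (domains : List (Int × Int × List Int)) : Prop :=
  ∀ c ∈ emptyCells, ∃ p ∈ domains, (p.1, p.2.1) = c
instance (emptyCells : List (Int × Int)) (domains : List (Int × Int × List Int)) : Decidable (Pre_minRemVal emptyCells domains) := by unfold Pre_minRemVal; infer_instance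

def pvWitness_minRemVal : (List (Int × Int)) × (List (Int × Int × List Int)) :=
  ([(0, 0), (1, 1)], [(0, 0, [1, 2]), (1, 1, [3])])

def Spec_minRemVal (emptyCells : List (Int × Int)) (domains : List (Int × Int × List Int)) (out : List (Int × Int)) : Prop := out = minRemVal_alt emptyCells domains
instance (emptyCells : List (Int × Int)) (domains : List (Int × Int × List Int)) (out : List (Int × Int)) : Decidable (Spec_minRemVal emptyCells domains out) := by unfold Spec_minRemVal; infer_instance

-- ===== CLAIM (what is proved, stated in full; the proofs are below) =====
def Claim_equal_minRemVal : Prop := ∀ (emptyCells : List (Int × Int)) (domains : List (Int × Int × List Int)), Dom_minRemVal emptyCells domains → Pre_minRemVal emptyCells domains → Spec_minRemVal emptyCells domains (minRemVal emptyCells domains)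

-- ===== LEMMAS AND PROOFS =====

-- the step at state (acc, some m): literal reduction of minRemValStep
theorem step_some (domains : List (Int × Int × List Int)) (acc : List (Int × Int)) (m : Nat) (cell : Int × Int) :
    minRemValStep domains (acc, some m) cell =
      (if pvLen domains cell = m then (acc ++ [cell], some m)
       else if pvLen domains cell < m then ([cell], some (pvLen domains cell))
       else (acc, some m)) := rfl

theorem step_none (domains : List (Int × Int × List Int)) (acc : List (Int × Int)) (cell : Int × Int) :
    minRemValStep domains (acc, none) cell = ([cell], some (pvLen domains cell)) := rfl

-- the running minimum never exceeds its seed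
theorem runMin_le (domains : List (Int × Int × List Int)) (xs : List (Int × Int)) :
    ∀ m : Nat, xs.foldl (fun a c => min a (pvLen domains c)) m ≤ m := by
  induction xs with
  | nil => intro m; simp
  | cons y s ih =>
    intro m
    simpa using le_trans (ih _) (Nat.min_le_left _ _)

-- A's loop from state (acc, some m): the final minimum is the running min, and the collected
-- cells are acc (kept iff the minimum never improved) followed by the cells attaining it.
theorem minRemVal_loop (domains : List (Int × Int × List Int)) (xs : List (Int × Int)) :
    ∀ (acc : List (Int × Int)) (m : Nat),
    xs.foldl (minRemValStep domains) (acc, some m) =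
      ((if xs.foldl (fun a c => min a (pvLen domains c)) m = m then acc else []) ++
        xs.filter (fun c => pvLen domains c == xs.foldl (fun a c => min a (pvLen domains c)) m),
       some (xs.foldl (fun a c => min a (pvLen domains c)) m)) := by
  induction xs with
  | nil => intro acc m; simp
  | cons x t ih =>
    intro acc m
    simp only [List.foldl_cons, step_some]
    by_cases h1 : pvLen domains x = m
    · rw [if_pos h1, ih]
      have hm : min m (pvLen domains x) = m := by omega
      simp only [hm]
      have hle := runMin_le domains t m
      by_cases h2 : t.foldl (fun a c => min a (pvLen domains c)) m = m
      · simp [h2, h1]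
      · have hne : ¬ pvLen domains x = t.foldl (fun a c => min a (pvLen domains c)) m := by omega
        simp [h2, hne]
    · rw [if_neg h1]
      by_cases h3 : pvLen domains x < m
      · rw [if_pos h3, ih]
        have hm : min m (pvLen domains x) = pvLen domains x := by omega
        simp only [hm]
        have hle := runMin_le domains t (pvLen domains x)
        have hne : ¬ t.foldl (fun a c => min a (pvLen domains c)) (pvLen domains x) = m := by omega
        by_cases h4 : t.foldl (fun a c => min a (pvLen domains c)) (pvLen domains x) = pvLen domains x
        · simp only [h4, List.filter_cons, beq_self_eq_true, if_true]
          simp [h1]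
        · simp only [h4, hne, if_false, List.filter_cons, List.nil_append]
          have : ¬ pvLen domains x = t.foldl (fun a c => min a (pvLen domains c)) (pvLen domains x) :=
            fun hh => h4 hh.symm
          simp [this]
      · rw [if_neg h3, ih]
        have hm : min m (pvLen domains x) = m := by omega
        simp only [hm]
        have hle := runMin_le domains t m
        have hne : ¬ pvLen domains x = t.foldl (fun a c => min a (pvLen domains c)) m := by omega
        simp [hne]

-- min of the mapped lengths is the same running min A maintains
theorem map_min?_eq (domains : List (Int × Int × List Int)) (x : Int × Int) (t : List (Int × Int)) :
    ((x :: t).map (pvLen domains)).min? =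
      some (t.foldl (fun a c => min a (pvLen domains c)) (pvLen domains x)) := by
  rw [List.map_cons, List.min?_cons', List.foldl_map]

-- ===== VERDICT (by name: the statement is the Claim_ definition above) =====
theorem minRemVal_spec : Claim_equal_minRemVal := by
  intro emptyCells domains _ _
  unfold Spec_minRemVal minRemVal minRemVal_alt
  cases emptyCells with
  | nil => simp
  | cons x t =>
    rw [map_min?_eq, List.foldl_cons, step_none, minRemVal_loop]
    have hle := runMin_le domains t (pvLen domains x)
    by_cases h : t.foldl (fun a c => min a (pvLen domains c)) (pvLen domains x) = pvLen domains x
    · simp [h]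
    · have hne : ¬ pvLen domains x = t.foldl (fun a c => min a (pvLen domains c)) (pvLen domains x) :=
        fun hh => h hh.symm
      simp [hne, h]
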